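-- pv_equiv track=rewrite | github.com/ZHangZHengEric/Sage | sagents/utils/stream_tag_parser.py | judge_delta_content_type
-- ===== SOURCE A (Python) =====
-- from typing import List, Optional
--
-- def judge_delta_content_type(
--     delta_content: str,
--     all_tokens_str: str,
--     tag_type: Optional[List[str]] = None,
-- ) -> str:
--     """根据已累积的 token 串与新 delta，判断当前位置位于哪个 tag 内部。
--
--     返回值：
--     - ``"tag"``：当前刚好在标签边界上（开始/结束 tag 本身或 tag 之外）；
--     - ``"unknown"``：紧跟在某个开始 tag 后，但当前 buffer 末尾正在拼接潜在的结束 tag 前缀；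
--     - 标签名（去掉尖括号）：当前位置位于该开始 tag 与对应结束 tag 之间。
--     """
--     if tag_type is None:
--         tag_type = []
--
--     start_tag = [f"<{tag}>" for tag in tag_type]
--     end_tag = [f"</{tag}>" for tag in tag_type]
--
--     # 结束标签的所有可能前缀（用于探测半截输出的结束 tag）
--     end_tag_process_list: List[str] = []
--     for tag in end_tag:
--         for i in range(len(tag)):
--             end_tag_process_list.append(tag[:i + 1])
--
--     last_tag = None
--     last_tag_index: Optional[int] = None
--
--     all_tokens_str = (all_tokens_str + delta_content).strip()
--
--     for tag in start_tag + end_tag: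
--         index = all_tokens_str.rfind(tag)
--         if index != -1:
--             if last_tag_index is None or index > last_tag_index:
--                 last_tag = tag
--                 last_tag_index = index
--
--     if last_tag is None or last_tag_index is None:
--         return "tag"
--
--     if last_tag in start_tag:
--         if last_tag_index + len(last_tag) == len(all_tokens_str):
--             return 'tag'
--         for end_tag_process in end_tag_process_list:
--             if all_tokens_str.endswith(end_tag_process):
--                 return 'unknown'
--         return last_tag.replace("<", "").replace(">", "")
--     elif last_tag in end_tag:
--         return 'tag'
--
--     return "tag"
-- ===== SOURCE B (Python) =====
-- from typing import List, Optional
--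
-- def _ends_with_partial_end_tag(s: str, tag_type: List[str]) -> bool:
--     # does s end with a nonempty prefix of some "</name>"?
--     for name in tag_type:
--         e = f"</{name}>"
--         for j in range(max(0, len(s) - len(e)), len(s)):
--             if e.startswith(s[j:]):
--                 return True
--     return False
--
-- def judge_delta_content_type(
--     delta_content: str,
--     all_tokens_str: str,
--     tag_type: Optional[List[str]] = None,
-- ) -> str:
--     if tag_type is None:
--         tag_type = []
--     s = (all_tokens_str + delta_content).strip()
--     tags = [(f"<{name}>", False) for name in tag_type] + \
--            [(f"</{name}>", True) for name in tag_type]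
--     tag_strings = tuple(tag for tag, _ in tags)
--     # scan positions right-to-left; the first hit is the rightmost tag occurrence
--     for pos in range(len(s) - 1, -1, -1):
--         if s.startswith(tag_strings, pos):
--             for tag, is_end in tags:
--                 if s.startswith(tag, pos):
--                     if is_end:
--                         return "tag"
--                     if pos + len(tag) == len(s):
--                         return "tag"
--                     if _ends_with_partial_end_tag(s, tag_type):
--                         return "unknown"
--                     return tag.replace("<", "").replace(">", "")
--     return "tag"
-- ===== Notes on version B (the rewrite author's own statement) =====
-- stated objective: alternative
-- what changed: B replaces A's per-tag rfind-and-maximize loop with a single right-to-left position scan that stops at the rightmost tag occurrence (first matching tag in list order), and detects a partial trailing end tag by matching nonempty suffixes of the buffer against each end tag instead of materialising every end-tag prefix and calling endswith on each.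
import Mathlib
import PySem

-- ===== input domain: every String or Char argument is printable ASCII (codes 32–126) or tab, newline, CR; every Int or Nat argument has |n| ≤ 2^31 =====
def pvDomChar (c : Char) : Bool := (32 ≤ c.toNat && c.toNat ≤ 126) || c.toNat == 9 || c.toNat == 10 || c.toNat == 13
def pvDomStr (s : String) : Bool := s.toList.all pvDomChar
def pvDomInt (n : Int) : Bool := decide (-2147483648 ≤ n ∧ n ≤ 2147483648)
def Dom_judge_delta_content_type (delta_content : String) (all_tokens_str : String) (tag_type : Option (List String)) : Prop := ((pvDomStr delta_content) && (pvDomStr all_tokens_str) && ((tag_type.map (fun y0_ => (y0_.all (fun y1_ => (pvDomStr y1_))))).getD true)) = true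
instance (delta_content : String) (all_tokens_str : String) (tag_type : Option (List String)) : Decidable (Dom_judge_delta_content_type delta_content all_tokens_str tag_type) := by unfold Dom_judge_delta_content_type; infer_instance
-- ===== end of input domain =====

-- B replaces A's per-tag rfind maximisation by a single right-to-left scan that stops at the
-- rightmost tag occurrence, and probes partial end tags by matching suffixes of the buffer
-- against each end tag instead of materialising the list of all end-tag prefixes (alternative).

-- ===== PORT A =====
def judge_delta_content_type (delta_content : String) (all_tokens_str : String) (tag_type : Option (List String)) : String :=
  let tag_type := tag_type.getD []
  let start_tag := tag_type.map (fun tag => "<" ++ tag ++ ">")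
  let end_tag := tag_type.map (fun tag => "</" ++ tag ++ ">")
  let end_tag_process_list : List String :=
    end_tag.foldl (fun acc tag =>
      (PySem.List.pyRange 0 (PySem.Str.len tag)).foldl
        (fun acc i => acc ++ [PySem.Str.slice tag none (some (i + 1))]) acc) []
  let all_tokens_str := PySem.Str.strip (all_tokens_str ++ delta_content)
  let st : Option String × Option Int :=
    (start_tag ++ end_tag).foldl (fun acc tag =>
      let index := PySem.Str.rfind all_tokens_str tag
      if index ≠ -1 then
        match acc.2 with
        | none => (some tag, some index)
        | some li => if li < index then (some tag, some index) else acc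
      else acc) (none, none)
  match st with
  | (some last_tag, some last_tag_index) =>
    if start_tag.contains last_tag then
      if last_tag_index + PySem.Str.len last_tag = PySem.Str.len all_tokens_str then "tag"
      else if end_tag_process_list.any (fun p => PySem.Str.endswith all_tokens_str p) then "unknown"
      else PySem.Str.replace (PySem.Str.replace last_tag "<" "") ">" ""
    else if end_tag.contains last_tag then "tag"
    else "tag"
  | _ => "tag"

-- ===== PORT B =====
-- does s end with a nonempty prefix of some "</name>"?
def pvAltPartial (s : List Char) (tag_type : List String) : Bool :=
  tag_type.any fun name =>
    let e := ("</" ++ name ++ ">").toList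
    (PySem.List.pyRange (max 0 ((s.length : Int) - e.length)) s.length).any fun j =>
      PySem.Chars.startswith e (s.drop j.toNat)

-- scan positions k-1, k-2, …, 0; at each, take the first tag that starts there
def pvAltFind (s : List Char) (tags : List (List Char × Bool)) : Nat → Option (Nat × List Char × Bool)
  | 0 => none
  | k + 1 =>
    if tags.any (fun t => t.1.isPrefixOf (s.drop k)) then
      match tags.find? (fun t => t.1.isPrefixOf (s.drop k)) with
      | some t => some (k, t)
      | none => pvAltFind s tags k
    else pvAltFind s tags k

def judge_delta_content_type_alt (delta_content : String) (all_tokens_str : String) (tag_type : Option (List String)) : String :=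
  let tag_type := tag_type.getD []
  let s := (PySem.Str.strip (all_tokens_str ++ delta_content)).toList
  let tags := tag_type.map (fun name => (("<" ++ name ++ ">").toList, false)) ++
              tag_type.map (fun name => (("</" ++ name ++ ">").toList, true))
  match pvAltFind s tags s.length with
  | none => "tag"
  | some (pos, tag, is_end) =>
    if is_end then "tag"
    else if pos + tag.length = s.length then "tag"
    else if pvAltPartial s tag_type then "unknown"
    else String.ofList (PySem.Chars.replace (PySem.Chars.replace tag ['<'] []) ['>'] [])

-- ===== PRECONDITION & SPEC =====
def Spec_judge_delta_content_type (delta_content : String) (all_tokens_str : String) (tag_type : Option (List String)) (out : String) : Prop := out = judge_delta_content_type_alt delta_content all_tokens_str tag_type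
instance (delta_content : String) (all_tokens_str : String) (tag_type : Option (List String)) (out : String) : Decidable (Spec_judge_delta_content_type delta_content all_tokens_str tag_type out) := by unfold Spec_judge_delta_content_type; infer_instance

-- ===== CLAIM (what is proved, stated in full; the proofs are below) =====
def Claim_equal_judge_delta_content_type : Prop := ∀ (delta_content : String) (all_tokens_str : String) (tag_type : Option (List String)), Dom_judge_delta_content_type delta_content all_tokens_str tag_type → Spec_judge_delta_content_type delta_content all_tokens_str tag_type (judge_delta_content_type delta_content all_tokens_str tag_type)

-- ===== LEMMAS AND PROOFS =====

theorem pvGoCases (s sub : List Char) (j : Nat) :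
    (PySem.Chars.rfind.go s sub j = -1 ∧ ∀ p ≤ j, ¬ sub <+: s.drop p) ∨
    (∃ p : Nat, PySem.Chars.rfind.go s sub j = (p : Int) ∧ p ≤ j ∧ sub <+: s.drop p ∧
      ∀ q ≤ j, p < q → ¬ sub <+: s.drop q) := by
  induction j with
  | zero =>
    by_cases h : sub <+: s.drop 0
    · right
      refine ⟨0, ?_, le_refl _, h, ?_⟩
      · simp [PySem.Chars.rfind.go, List.isPrefixOf_iff_prefix.mpr (by simpa using h)]
      · intro q hq hq'; omega
    · left
      constructor
      · simp only [PySem.Chars.rfind.go]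
        rw [if_neg]
        simp only [List.isPrefixOf_iff_prefix]
        simpa using h
      · intro p hp; interval_cases p; exact h
  | succ j ih =>
    by_cases h : sub <+: s.drop (j + 1)
    · right
      refine ⟨j + 1, ?_, le_refl _, h, ?_⟩
      · simp [PySem.Chars.rfind.go, List.isPrefixOf_iff_prefix.mpr h]
      · intro q hq hq'; omega
    · have hgo : PySem.Chars.rfind.go s sub (j + 1) = PySem.Chars.rfind.go s sub j := by
        simp only [PySem.Chars.rfind.go]
        rw [if_neg]
        simp only [List.isPrefixOf_iff_prefix]
        exact h
      rcases ih with ⟨h1, h2⟩ | ⟨p, h1, h2, h3, h4⟩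
      · left
        refine ⟨hgo ▸ h1, fun p hp => ?_⟩
        rcases Nat.lt_or_ge p (j+1) with hh | hh
        · exact h2 p (by omega)
        · have : p = j + 1 := by omega
          subst this; exact h
      · right
        refine ⟨p, hgo ▸ h1, by omega, h3, fun q hq hq' => ?_⟩
        rcases Nat.lt_or_ge q (j+1) with hh | hh
        · exact h4 q (by omega) hq'
        · have : q = j + 1 := by omega
          subst this; exact h


theorem pvRfindCases (s sub : List Char) :
    (PySem.Chars.rfind s sub = -1 ∧ ∀ p ≤ s.length, ¬ sub <+: s.drop p) ∨
    (∃ p : Nat, PySem.Chars.rfind s sub = (p : Int) ∧ p ≤ s.length ∧ sub <+: s.drop p ∧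
      ∀ q ≤ s.length, p < q → ¬ sub <+: s.drop q) := by
  simp only [PySem.Chars.rfind]
  exact pvGoCases s sub s.length

theorem pvRfindValCases (sStr t : String) :
    PySem.Str.rfind sStr t = -1 ∨ ∃ q : Nat, PySem.Str.rfind sStr t = (q : Int) := by
  rw [PySem.Str.rfind_eq]
  rcases pvRfindCases sStr.toList t.toList with ⟨h, _⟩ | ⟨q, h, _⟩
  · exact Or.inl h
  · exact Or.inr ⟨q, h⟩

def pvStepA (sStr : String) (acc : Option String × Option Int) (tag : String) : Option String × Option Int :=
  let index := PySem.Str.rfind sStr tag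
  if index ≠ -1 then
    match acc.2 with
    | none => (some tag, some index)
    | some li => if li < index then (some tag, some index) else acc
  else acc

theorem pvFoldASpec (sStr : String) (L : List String) :
    (L.foldl (pvStepA sStr) (none, none) = (none, none) ∧
      ∀ t ∈ L, PySem.Str.rfind sStr t = -1) ∨
    (∃ (i : Nat) (p : Nat), ∃ hi : i < L.length, L.foldl (pvStepA sStr) (none, none) = (some (L[i]'hi), some (p : Int)) ∧
      PySem.Str.rfind sStr (L[i]'hi) = (p : Int) ∧
      (∀ t ∈ L, PySem.Str.rfind sStr t ≤ (p : Int)) ∧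
      (∀ j (hj : j < i), PySem.Str.rfind sStr (L[j]'(by omega)) ≠ (p : Int))) := by
  induction L using List.reverseRecOn with
  | nil => left; exact ⟨rfl, by simp⟩
  | append_singleton L t ih =>
    rw [List.foldl_append]
    simp only [List.foldl_cons, List.foldl_nil]
    rcases pvRfindValCases sStr t with hv | ⟨q, hv⟩
    · -- t does not occur: step is identity
      have hv' : PySem.Chars.rfind sStr.toList t.toList = -1 := by
        rw [← PySem.Str.rfind_eq]; exact hv
      have hstep : ∀ acc, pvStepA sStr acc t = acc := by
        intro acc; simp [pvStepA, hv']
      rcases ih with ⟨h1, h2⟩ | ⟨i, p, hi, h1, h2, h3, h4⟩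
      · left
        refine ⟨by rw [h1, hstep], fun u hu => ?_⟩
        rcases List.mem_append.mp hu with h | h
        · exact h2 u h
        · simp only [List.mem_singleton] at h; subst h; exact hv
      · right
        refine ⟨i, p, by simp; omega, ?_, ?_, ?_, ?_⟩
        · rw [h1, hstep, List.getElem_append_left hi]
        · rw [List.getElem_append_left hi]; exact h2
        · intro u hu
          rcases List.mem_append.mp hu with h | h
          · exact h3 u h
          · simp only [List.mem_singleton] at h; subst h; rw [hv]; omega
        · intro j hj
          rw [List.getElem_append_left (by omega)]
          exact h4 j hj
    · -- t occurs at q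
      have hv' : PySem.Chars.rfind sStr.toList t.toList = (q : Int) := by
        rw [← PySem.Str.rfind_eq]; exact hv
      rcases ih with ⟨h1, h2⟩ | ⟨i, p, hi, h1, h2, h3, h4⟩
      · right
        refine ⟨L.length, q, by simp, ?_, ?_, ?_, ?_⟩
        · rw [h1]
          simp [pvStepA, hv']
        · simp [hv']
        · intro u hu
          rcases List.mem_append.mp hu with h | h
          · rw [h2 u h]; omega
          · simp only [List.mem_singleton] at h; subst h; rw [hv]
        · intro j hj
          rw [List.getElem_append_left (by omega), h2 _ (by simp)]
          omega
      · by_cases hlt : p < q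
        · right
          refine ⟨L.length, q, by simp, ?_, ?_, ?_, ?_⟩
          · rw [h1]
            simp [pvStepA, hv', hlt]
          · simp [hv']
          · intro u hu
            rcases List.mem_append.mp hu with h | h
            · have := h3 u h; omega
            · simp only [List.mem_singleton] at h; subst h; rw [hv]
          · intro j hj
            rw [List.getElem_append_left (by omega)]
            have := h3 _ (List.getElem_mem (by omega : j < L.length))
            omega
        · right
          refine ⟨i, p, by simp; omega, ?_, ?_, ?_, ?_⟩
          · rw [h1]
            simp [pvStepA, hv', hlt, List.getElem_append_left hi]
          · rw [List.getElem_append_left hi]; exact h2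
          · intro u hu
            rcases List.mem_append.mp hu with h | h
            · exact h3 u h
            · simp only [List.mem_singleton] at h; subst h; rw [hv]; omega
          · intro j hj
            rw [List.getElem_append_left (by omega)]
            exact h4 j hj


theorem pvAltFindSpec (s : List Char) (tags : List (List Char × Bool)) (k : Nat) :
    (pvAltFind s tags k = none ∧ ∀ p, p < k → ∀ u ∈ tags, ¬ u.1 <+: s.drop p) ∨
    (∃ p i, ∃ hi : i < tags.length, p < k ∧ pvAltFind s tags k = some (p, tags[i]'hi) ∧
      (tags[i]'hi).1 <+: s.drop p ∧
      (∀ q, p < q → q < k → ∀ u ∈ tags, ¬ u.1 <+: s.drop q) ∧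
      (∀ j (hj : j < i), ¬ (tags[j]'(by omega)).1 <+: s.drop p)) := by
  induction k with
  | zero => left; exact ⟨rfl, by omega⟩
  | succ k ih =>
    rcases hf : tags.find? (fun t => t.1.isPrefixOf (s.drop k)) with _ | t
    · have hany : tags.any (fun t => t.1.isPrefixOf (s.drop k)) = false := by
        rw [List.any_eq_false]
        intro u hu
        simpa using List.find?_eq_none.mp hf u hu
      have hnone : ∀ u ∈ tags, ¬ u.1 <+: s.drop k := by
        intro u hu
        have := List.find?_eq_none.mp hf u hu
        simpa [List.isPrefixOf_iff_prefix] using this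
      rcases ih with ⟨h1, h2⟩ | ⟨p, i, hi, h1, h2, h3, h4, h5⟩
      · left
        refine ⟨by simp [pvAltFind, hany, h1], fun p hp u hu => ?_⟩
        rcases Nat.lt_or_ge p k with hh | hh
        · exact h2 p hh u hu
        · have : p = k := by omega
          subst this; exact hnone u hu
      · right
        refine ⟨p, i, hi, by omega, by simp [pvAltFind, hany, h2], h3, fun q hq hq' u hu => ?_, h5⟩
        rcases Nat.lt_or_ge q k with hh | hh
        · exact h4 q hq hh u hu
        · have : q = k := by omega
          subst this; exact hnone u hu
    · right
      rcases List.find?_eq_some_iff_getElem.mp hf with ⟨hpred, i, hi, hti, hmin⟩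
      have hany : tags.any (fun t => t.1.isPrefixOf (s.drop k)) = true := by
        rw [List.any_eq_true]
        exact ⟨t, List.mem_of_find?_eq_some hf, hpred⟩
      refine ⟨k, i, hi, by omega, by simp [pvAltFind, hany, hf, hti], ?_, by omega, ?_⟩
      · rw [hti]; simpa [List.isPrefixOf_iff_prefix] using hpred
      · intro j hj
        have := hmin j (by omega)
        simp only [Bool.not_eq_true'] at this
        rw [← List.isPrefixOf_iff_prefix]
        simp [this]


theorem pvPartialEq (sStr : String) (names : List String) :
    ((names.map (fun tag => "</" ++ tag ++ ">")).foldl (fun acc tag =>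
        (PySem.List.pyRange 0 (PySem.Str.len tag)).foldl
          (fun acc i => acc ++ [PySem.Str.slice tag none (some (i + 1))]) acc) []).any
      (fun p => PySem.Str.endswith sStr p)
    = pvAltPartial sStr.toList names := by
  rw [Bool.eq_iff_iff]
  have hL : ∀ (acc : List String),
      (names.map (fun tag => "</" ++ tag ++ ">")).foldl (fun acc tag =>
        (PySem.List.pyRange 0 (PySem.Str.len tag)).foldl
          (fun acc i => acc ++ [PySem.Str.slice tag none (some (i + 1))]) acc) acc
      = acc ++ (names.map (fun tag => "</" ++ tag ++ ">")).flatMap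
          (fun tag => (PySem.List.pyRange 0 (PySem.Str.len tag)).map
            (fun i => PySem.Str.slice tag none (some (i + 1)))) := by
    intro acc
    rw [← PySem.List.foldl_append_eq_flatMap]
    congr 1
    funext a tag
    exact PySem.List.foldl_append_singleton_eq_map _ _ _
  rw [hL]
  simp only [pvAltPartial, List.any_eq_true, List.nil_append, List.mem_flatMap, List.mem_map]
  constructor
  · rintro ⟨pfx, ⟨tag, ⟨n, hn, rfl⟩, ⟨i, hi, rfl⟩⟩, hend⟩
    refine ⟨n, hn, ?_⟩
    -- i ∈ pyRange 0 (len e) : 0 ≤ i < len e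
    rw [PySem.List.mem_pyRange_one] at hi
    rw [PySem.Str.len_eq] at hi
    set e : List Char := ("</" ++ n ++ ">").toList with he
    have hi0 : 0 ≤ i := hi.1
    have hilen : i < (e.length : Int) := hi.2
    -- the prefix as list
    have hpfxl : (PySem.Str.slice ("</" ++ n ++ ">") none (some (i + 1))).toList
        = e.take (i + 1).toNat := by
      rw [PySem.Str.toList_slice, PySem.Chars.slice_eq_listSlice,
        PySem.List.slice_to _ (by omega)]
    rw [PySem.Str.endswith_eq, PySem.Chars.endswith_iff, hpfxl] at hend
    -- the suffix position
    have hlen : (e.take (i + 1).toNat).length = (i + 1).toNat := by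
      rw [List.length_take]
      omega
    have hle : (i+1).toNat ≤ sStr.toList.length := by
      have := hend.length_le
      omega
    refine ⟨(sStr.toList.length : Int) - (i + 1), ?_, ?_⟩
    · rw [PySem.List.mem_pyRange_one]
      constructor
      · omega
      · omega
    · rw [PySem.Chars.startswith_iff]
      have hdrop : sStr.toList.drop ((sStr.toList.length : Int) - (i + 1)).toNat
          = e.take (i + 1).toNat := by
        have h1 := List.suffix_iff_eq_drop.mp hend
        rw [hlen] at h1
        have harg : ((sStr.toList.length : Int) - (i + 1)).toNat = sStr.toList.length - (i + 1).toNat := by omega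
        rw [harg, ← h1]
      rw [hdrop]
      exact List.take_prefix _ _
  · rintro ⟨n, hn, j, hj, hpre⟩
    rw [PySem.List.mem_pyRange_one] at hj
    set e : List Char := ("</" ++ n ++ ">").toList with he
    rw [PySem.Chars.startswith_iff] at hpre
    have hj0 : 0 ≤ j := le_trans (le_max_left _ _) hj.1
    have hjlt : j.toNat < sStr.toList.length := by omega
    set t : List Char := sStr.toList.drop j.toNat with ht
    have htne : t ≠ [] := by
      rw [ht]
      simp only [ne_eq, List.drop_eq_nil_iff]
      omega
    have htlen : t.length = sStr.toList.length - j.toNat := by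
      rw [ht, List.length_drop]
    have htle : t.length ≤ e.length := hpre.length_le
    have htpos : 0 < t.length := List.length_pos_iff.mpr htne
    refine ⟨PySem.Str.slice ("</" ++ n ++ ">") none (some ((t.length - 1 : Nat) + 1)),
      ⟨"</" ++ n ++ ">", ⟨n, hn, rfl⟩, ⟨((t.length - 1 : Nat) : Int), ?_, rfl⟩⟩, ?_⟩
    · rw [PySem.List.mem_pyRange_one, PySem.Str.len_eq, ← he]
      constructor
      · omega
      · omega
    · rw [PySem.Str.endswith_eq, PySem.Chars.endswith_iff]
      have : (PySem.Str.slice ("</" ++ n ++ ">") none (some ((t.length - 1 : Nat) + 1))).toList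
          = e.take t.length := by
        rw [PySem.Str.toList_slice, PySem.Chars.slice_eq_listSlice,
          PySem.List.slice_to _ (by omega)]
        congr 1
        omega
      rw [this]
      have := List.prefix_iff_eq_take.mp hpre
      rw [← this]
      exact List.drop_suffix _ _


set_option maxHeartbeats 1000000 in
theorem pvMain (dc ats : String) (tt : Option (List String)) :
    judge_delta_content_type dc ats tt = judge_delta_content_type_alt dc ats tt := by
  unfold judge_delta_content_type judge_delta_content_type_alt
  dsimp only
  set sStr := PySem.Str.strip (ats ++ dc)
  set names := tt.getD []
  have hfoldfun : (fun (acc : Option String × Option Int) (tag : String) =>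
      let index := PySem.Str.rfind sStr tag
      if index ≠ -1 then
        match acc.2 with
        | none => (some tag, some index)
        | some li => if li < index then (some tag, some index) else acc
      else acc) = pvStepA sStr := rfl
  rw [hfoldfun]
  set T := names.map (fun name => (("<" ++ name ++ ">").toList, false)) ++
           names.map (fun name => (("</" ++ name ++ ">").toList, true)) with hT
  set L := names.map (fun tag => "<" ++ tag ++ ">") ++ names.map (fun tag => "</" ++ tag ++ ">") with hL
  have hlenL : L.length = names.length + names.length := by simp [hL]
  have hlenT : T.length = names.length + names.length := by simp [hT]
  have hTL : ∀ (i : Nat) (hiT : i < T.length) (hiL : i < L.length),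
      (T[i]'hiT).1 = (L[i]'hiL).toList := by
    intro i hiT hiL
    rcases Nat.lt_or_ge i names.length with h | h
    · simp only [hT, hL]
      rw [List.getElem_append_left (by simpa using h),
        List.getElem_append_left (by simpa using h)]
      simp
    · simp only [hT, hL]
      rw [List.getElem_append_right (by simpa using h),
        List.getElem_append_right (by simpa using h)]
      simp
  have hTflag : ∀ (i : Nat) (hiT : i < T.length), (T[i]'hiT).2 = decide (names.length ≤ i) := by
    intro i hiT
    rcases Nat.lt_or_ge i names.length with h | h
    · simp only [hT]
      rw [List.getElem_append_left (by simpa using h)]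
      simp [Nat.not_le.mpr h]
    · simp only [hT]
      rw [List.getElem_append_right (by simpa using h)]
      simp [h]
  have hTne : ∀ u ∈ T, u.1 ≠ [] := by
    intro u hu
    rw [hT] at hu
    rcases List.mem_append.mp hu with h | h <;>
      (rcases List.mem_map.mp h with ⟨n, _, rfl⟩; simp [String.toList_append])
  have hrfind_some : ∀ (u : String) (q : Nat), PySem.Str.rfind sStr u = (q : Int) →
      u.toList <+: sStr.toList.drop q ∧ q ≤ sStr.toList.length := by
    intro u q h
    rw [PySem.Str.rfind_eq] at h
    rcases pvRfindCases sStr.toList u.toList with ⟨h1, _⟩ | ⟨q', h1, h2, h3, _⟩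
    · rw [h1] at h; omega
    · rw [h1] at h
      have : q' = q := by exact_mod_cast h
      subst this
      exact ⟨h3, h2⟩
  rcases pvAltFindSpec sStr.toList T sStr.toList.length with ⟨hscan, hnom⟩ |
    ⟨p, i, hiT, hplt, hscan, hpre, hmax, hmin⟩
  · -- no tag occurs anywhere: both 'tag'
    rw [hscan]
    rcases pvFoldASpec sStr L with ⟨hf, _⟩ | ⟨i, q, hiL, hf, hrf, _, _⟩
    · rw [hf]
    · exfalso
      rcases hrfind_some _ _ hrf with ⟨hpre', hle⟩
      have hiT' : i < T.length := by omega
      rw [← hTL i hiT' hiL] at hpre'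
      have hqlt : q < sStr.toList.length := by
        rcases Nat.lt_or_ge q sStr.toList.length with h | h
        · exact h
        · exfalso
          have : q = sStr.toList.length := by omega
          subst this
          rw [List.drop_length] at hpre'
          exact hTne _ (List.getElem_mem hiT') (List.prefix_nil.mp hpre')
      exact hnom q hqlt _ (List.getElem_mem hiT') hpre'
  · -- rightmost occurrence at position p, first matching tag index i
    have hiL : i < L.length := by omega
    have hmax' : ∀ q, p < q → q ≤ sStr.toList.length → ∀ u ∈ T, ¬ u.1 <+: sStr.toList.drop q := by
      intro q h1 h2 u hu hp
      rcases Nat.lt_or_ge q sStr.toList.length with hq | hq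
      · exact hmax q h1 hq u hu hp
      · have : q = sStr.toList.length := by omega
        subst this
        rw [List.drop_length] at hp
        exact hTne u hu (List.prefix_nil.mp hp)
    have hbound : ∀ u ∈ L, PySem.Str.rfind sStr u ≤ (p : Int) := by
      intro u hu
      rcases pvRfindValCases sStr u with h | ⟨q, h⟩
      · rw [h]; omega
      · rcases hrfind_some u q h with ⟨hpre', hle⟩
        rw [h]
        by_contra hgt
        have hpq : p < q := by omega
        rcases List.mem_iff_getElem.mp hu with ⟨j, hj, hju⟩
        have hjT : j < T.length := by omega
        have := hmax' q hpq hle (T[j]'hjT) (List.getElem_mem hjT)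
        rw [hTL j hjT hj, hju] at this
        exact this hpre'
    have hpreL : (L[i]'hiL).toList <+: sStr.toList.drop p := by
      rw [← hTL i hiT hiL]; exact hpre
    have hrfi : PySem.Str.rfind sStr (L[i]'hiL) = (p : Int) := by
      rw [PySem.Str.rfind_eq]
      rcases pvRfindCases sStr.toList (L[i]'hiL).toList with ⟨h1, h2⟩ | ⟨q, h1, h2, h3, h4⟩
      · exact absurd hpreL (h2 p (by omega))
      · rw [h1]
        have hqp : q ≤ p := by
          have := hbound (L[i]'hiL) (List.getElem_mem hiL)
          rw [PySem.Str.rfind_eq, h1] at this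
          exact_mod_cast this
        have hpq : p ≤ q := by
          by_contra hc
          exact h4 p (by omega) (by omega) hpreL
        have : q = p := by omega
        rw [this]
    have hne_lt : ∀ j (hj : j < i), PySem.Str.rfind sStr (L[j]'(by omega)) ≠ (p : Int) := by
      intro j hj h
      have hp' := (hrfind_some _ _ h).1
      rw [← hTL j (by omega) (by omega)] at hp'
      exact hmin j hj hp'
    rcases pvFoldASpec sStr L with ⟨_, hall⟩ | ⟨i2, p2, hi2, hf, hrf2, hbound2, hmin2⟩
    · exfalso
      have := hall _ (List.getElem_mem hiL)
      rw [hrfi] at this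
      omega
    · have hp2 : p = p2 := by
        have h1 : (p2 : Int) ≤ p := by
          have := hbound _ (List.getElem_mem hi2)
          rw [hrf2] at this
          exact this
        have h2 : (p : Int) ≤ p2 := by
          have := hbound2 _ (List.getElem_mem hiL)
          rw [hrfi] at this
          exact this
        omega
      subst hp2
      have hi2i : i = i2 := by
        rcases lt_trichotomy i2 i with h | h | h
        · exact absurd hrf2 (hne_lt i2 h)
        · exact h.symm
        · exact absurd hrfi (hmin2 i h)
      subst hi2i
      rw [hf, hscan]
      have hTi : T[i]'hiT = ((L[i]'hiL).toList, decide (names.length ≤ i)) :=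
        Prod.ext (hTL i hiT hiL) (hTflag i hiT)
      rw [hTi]
      dsimp only
      rcases Nat.lt_or_ge i names.length with hcase | hcase
      · -- the rightmost tag is a start tag
        have hLi : L[i]'hiL = "<" ++ (names[i]'hcase) ++ ">" := by
          simp only [hL]
          rw [List.getElem_append_left (by simpa using hcase)]
          simp
        have hcont : (names.map (fun tag => "<" ++ tag ++ ">")).contains (L[i]'hiL) = true := by
          have : L[i]'hiL ∈ names.map (fun tag => "<" ++ tag ++ ">") := by
            rw [hLi]
            exact List.mem_map_of_mem (List.getElem_mem hcase)
          simpa using this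
        rw [hcont, if_pos rfl]
        have hflag : decide (names.length ≤ i) = false := by simp [Nat.not_le.mpr hcase]
        rw [hflag]
        simp only [Bool.false_eq_true, if_false]
        have hc1 : ((p : Int) + PySem.Str.len (L[i]'hiL) = PySem.Str.len sStr) ↔
            (p + (L[i]'hiL).toList.length = sStr.toList.length) := by
          rw [PySem.Str.len_eq, PySem.Str.len_eq]
          omega
        by_cases hlen : p + (L[i]'hiL).toList.length = sStr.toList.length
        · rw [if_pos (hc1.mpr hlen), if_pos hlen]
        · rw [if_neg (fun hh => hlen (hc1.mp hh)), if_neg hlen]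
          rw [pvPartialEq sStr names]
          by_cases hpart : pvAltPartial sStr.toList names = true
          · rw [if_pos hpart, if_pos hpart]
          · rw [if_neg hpart, if_neg hpart]
            apply String.toList_inj.mp
            rw [PySem.Str.toList_replace, PySem.Str.toList_replace]
            have e2 : (">" : String).toList = ['>'] := rfl
            have e3 : ("" : String).toList = [] := rfl
            simp only [e2, e3]
            exact String.toList_ofList.symm
      · -- the rightmost tag is an end tag
        have hflag : decide (names.length ≤ i) = true := by simp [hcase]
        rw [hflag, if_pos rfl]
        have hnotmem : (names.map (fun tag => "<" ++ tag ++ ">")).contains (L[i]'hiL) = false := by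
          have hnm : L[i]'hiL ∉ names.map (fun tag => "<" ++ tag ++ ">") := by
            intro hmem
            rcases List.mem_iff_getElem.mp hmem with ⟨j, hj, hje⟩
            have hj' : j < names.length := by simpa using hj
            have hLj : L[j]'(by omega) = L[i]'hiL := by
              simp only [hL]
              rw [List.getElem_append_left (by simpa using hj')]
              rw [← hje]
            have : (T[j]'(by omega)).1 <+: sStr.toList.drop p := by
              rw [hTL j (by omega) (by omega), hLj, ← hTL i hiT hiL]
              exact hpre
            exact hmin j (by omega) this
          simpa using hnm
        rw [hnotmem]
        simp only [Bool.false_eq_true, if_false]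
        split <;> rfl

-- ===== VERDICT (by name: the statement is the Claim_ definition above) =====
theorem judge_delta_content_type_spec : Claim_equal_judge_delta_content_type := by
  intro dc ats tt _
  show judge_delta_content_type dc ats tt = judge_delta_content_type_alt dc ats tt
  exact pvMain dc ats tt
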